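-- pv_equiv track=rewrite | github.com/MichaelangeloC/Project | app/job_scanner/demo_jobs.py | _generate_job_description
-- ===== SOURCE A (Python) =====
-- def _generate_job_description(title, keywords):
--     """Generate a job description based on title and keywords"""
--     tech_stacks = {
--         "frontend": ["HTML", "CSS", "JavaScript", "TypeScript", "React", "Angular", "Vue.js"],
--         "backend": ["Node.js", "Python", "Java", "C#", ".NET", "Ruby", "PHP", "Go"],
--         "database": ["SQL", "MongoDB", "PostgreSQL", "MySQL", "Redis", "DynamoDB"],
--         "cloud": ["AWS", "Azure", "Google Cloud", "Kubernetes", "Docker", "Terraform"],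
--         "data": ["Python", "R", "SQL", "Pandas", "NumPy", "TensorFlow", "PyTorch", "Scikit-learn"]
--     }
--
--     # Determine relevant tech stack based on title
--     relevant_stacks = []
--     if any(term in title.lower() for term in ["frontend", "web", "ui", "ux"]):
--         relevant_stacks.extend(["frontend", "backend"])
--     elif any(term in title.lower() for term in ["backend", "server"]):
--         relevant_stacks.extend(["backend", "database"])
--     elif any(term in title.lower() for term in ["full stack", "fullstack"]):
--         relevant_stacks.extend(["frontend", "backend", "database"])
--     elif any(term in title.lower() for term in ["data", "scientist", "analyst"]):
--         relevant_stacks.extend(["data", "database"])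
--     elif any(term in title.lower() for term in ["devops", "cloud", "infrastructure"]):
--         relevant_stacks.extend(["cloud", "backend"])
--     else:
--         # Default to a mix of stacks
--         relevant_stacks = list(tech_stacks.keys())
--
--     # Generate required skills based on relevant stacks
--     required_skills = []
--     for stack in relevant_stacks:
--         required_skills.extend(tech_stacks[stack][:3])  # Take first 3 from each relevant stack
--
--     # Add keywords to required skills
--     for keyword in keywords:
--         if keyword.lower() not in [skill.lower() for skill in required_skills]:
--             required_skills.append(keyword.capitalize())
--
--     # Generate job description
--     description = f"""
--     # About the Role
--
--     We are seeking a talented {title} to join our team. The ideal candidate will have experience with {', '.join(required_skills[:3])} and a passion for building high-quality software solutions.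
--
--     # Responsibilities
--
--     - Design, develop, and maintain software applications using {', '.join(required_skills[:2])}
--     - Collaborate with cross-functional teams to define, design, and ship new features
--     - Ensure the performance, quality, and responsiveness of applications
--     - Identify and correct bottlenecks and fix bugs
--     - Help maintain code quality, organization, and automatization
--
--     # Requirements
--
--     - {3-7} years of experience with {', '.join(required_skills[:3])}
--     - Bachelor's degree in Computer Science, Engineering or related field
--     - Strong problem solving skills and attention to detail
--     - Excellent communication and teamwork skills
--     - Experience with {', '.join(required_skills[3:5])} is a plus
--
--     # Benefits
--
--     - Competitive salary and benefits package
--     - Flexible work schedule and remote options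
--     - Professional development opportunities
--     - Collaborative and innovative work environment
--     - Health, dental, and vision insurance
--
--     Join our team and help us build the next generation of technology solutions!
--     """
--
--     return description
-- ===== SOURCE B (Python) =====
-- def _generate_job_description(title, keywords):
--     """Generate a job description based on title and keywords.
--
--     Closed form: the template only ever reads required_skills[:3], [:2] and [3:5],
--     and every branch's base stack contributes at least 6 skills before any keyword
--     is appended, so the keyword-dedup loop can never influence the output; the three
--     skill strings are therefore precomputed constants per branch (partial evaluation
--     of the constant tech_stacks table)."""
--     t = title.lower()
--     if any(w in t for w in ("frontend", "web", "ui", "ux")):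
--         top3, top2, plus = "HTML, CSS, JavaScript", "HTML, CSS", "Node.js, Python"
--     elif any(w in t for w in ("backend", "server")):
--         top3, top2, plus = "Node.js, Python, Java", "Node.js, Python", "SQL, MongoDB"
--     elif any(w in t for w in ("full stack", "fullstack")):
--         top3, top2, plus = "HTML, CSS, JavaScript", "HTML, CSS", "Node.js, Python"
--     elif any(w in t for w in ("data", "scientist", "analyst")):
--         top3, top2, plus = "Python, R, SQL", "Python, R", "SQL, MongoDB"
--     elif any(w in t for w in ("devops", "cloud", "infrastructure")):
--         top3, top2, plus = "AWS, Azure, Google Cloud", "AWS, Azure", "Node.js, Python"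
--     else:
--         top3, top2, plus = "HTML, CSS, JavaScript", "HTML, CSS", "Node.js, Python"
--     return f"""
--     # About the Role
--
--     We are seeking a talented {title} to join our team. The ideal candidate will have experience with {top3} and a passion for building high-quality software solutions.
--
--     # Responsibilities
--
--     - Design, develop, and maintain software applications using {top2}
--     - Collaborate with cross-functional teams to define, design, and ship new features
--     - Ensure the performance, quality, and responsiveness of applications
--     - Identify and correct bottlenecks and fix bugs
--     - Help maintain code quality, organization, and automatization
--
--     # Requirements
--
--     - {3-7} years of experience with {top3}
--     - Bachelor's degree in Computer Science, Engineering or related field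
--     - Strong problem solving skills and attention to detail
--     - Excellent communication and teamwork skills
--     - Experience with {plus} is a plus
--
--     # Benefits
--
--     - Competitive salary and benefits package
--     - Flexible work schedule and remote options
--     - Professional development opportunities
--     - Collaborative and innovative work environment
--     - Health, dental, and vision insurance
--
--     Join our team and help us build the next generation of technology solutions!
--     """
-- ===== Notes on version B (the rewrite author's own statement) =====
-- stated objective: faster
-- what changed: B is a closed form obtained by partially evaluating the constant tech_stacks table: the template only ever reads required_skills[:3], [:2] and [3:5], and every branch's base stack list already has at least 6 entries, so the skill-assembly loop and the entire keyword-dedup loop are provably dead code; B just selects three precomputed constant strings per title branch and formats the template, never touching keywords.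
import Mathlib
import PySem

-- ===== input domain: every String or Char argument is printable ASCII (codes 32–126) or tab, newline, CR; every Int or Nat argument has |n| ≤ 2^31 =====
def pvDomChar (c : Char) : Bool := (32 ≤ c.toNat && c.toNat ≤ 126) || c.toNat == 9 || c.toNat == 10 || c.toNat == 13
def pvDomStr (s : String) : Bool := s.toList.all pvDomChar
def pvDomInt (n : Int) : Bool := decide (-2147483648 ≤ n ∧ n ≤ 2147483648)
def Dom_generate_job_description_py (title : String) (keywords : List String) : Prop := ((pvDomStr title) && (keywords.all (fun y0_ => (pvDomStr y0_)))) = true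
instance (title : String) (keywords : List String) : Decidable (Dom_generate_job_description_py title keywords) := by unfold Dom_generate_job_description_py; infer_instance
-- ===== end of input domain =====

-- B partially evaluates A's constant tech-stack table into a closed form: the template only reads
-- required_skills[:3], [:2] and [3:5] and every branch's base list already has ≥ 6 skills, so the
-- skill-assembly and keyword-dedup loops are dead code and B just picks three constant strings per
-- title branch; objective: faster (B never traverses keywords).

-- Shared f-string template (identical literal in both Python sources).
def jdTemplate (title j3 j2 j35 : String) : String :=
  "\n    # About the Role\n\n    We are seeking a talented " ++ title ++ " to join our team. The ideal candidate will have experience with " ++ j3 ++ " and a passion for building high-quality software solutions.\n\n    # Responsibilities\n\n    - Design, develop, and maintain software applications using " ++ j2 ++ "\n    - Collaborate with cross-functional teams to define, design, and ship new features\n    - Ensure the performance, quality, and responsiveness of applications\n    - Identify and correct bottlenecks and fix bugs\n    - Help maintain code quality, organization, and automatization\n\n    # Requirements\n\n    - " ++ "-4" ++ " years of experience with " ++ j3 ++ "\n    - Bachelor's degree in Computer Science, Engineering or related field\n    - Strong problem solving skills and attention to detail\n    - Excellent communication and teamwork skills\n    - Experience with " ++ j35 ++ " is a plus\n\n    # Benefits\n\n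    - Competitive salary and benefits package\n    - Flexible work schedule and remote options\n    - Professional development opportunities\n    - Collaborative and innovative work environment\n    - Health, dental, and vision insurance\n\n    Join our team and help us build the next generation of technology solutions!\n    "

-- ===== PORT A =====
def jdStacks : PySem.Dict String (List String) := PySem.Dict.ofList [
  ("frontend", ["HTML", "CSS", "JavaScript", "TypeScript", "React", "Angular", "Vue.js"]),
  ("backend", ["Node.js", "Python", "Java", "C#", ".NET", "Ruby", "PHP", "Go"]),
  ("database", ["SQL", "MongoDB", "PostgreSQL", "MySQL", "Redis", "DynamoDB"]),
  ("cloud", ["AWS", "Azure", "Google Cloud", "Kubernetes", "Docker", "Terraform"]),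
  ("data", ["Python", "R", "SQL", "Pandas", "NumPy", "TensorFlow", "PyTorch", "Scikit-learn"])]

-- str.capitalize (not in PySem; hand-ported, exact on the ASCII domain: first char uppercased, rest lowercased)
def pyCapitalize (s : String) : String :=
  match s.toList with
  | [] => ""
  | c :: r => String.ofList (PySem.Chars.upperChar c :: PySem.Chars.lower r)

def generate_job_description_py (title : String) (keywords : List String) : String :=
  let tl := PySem.Str.lower title
  let relevant_stacks : List String :=
    if (["frontend", "web", "ui", "ux"] : List String).any (fun term => PySem.Str.isIn term tl) then
      ["frontend", "backend"]
    else if (["backend", "server"] : List String).any (fun term => PySem.Str.isIn term tl) then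
      ["backend", "database"]
    else if (["full stack", "fullstack"] : List String).any (fun term => PySem.Str.isIn term tl) then
      ["frontend", "backend", "database"]
    else if (["data", "scientist", "analyst"] : List String).any (fun term => PySem.Str.isIn term tl) then
      ["data", "database"]
    else if (["devops", "cloud", "infrastructure"] : List String).any (fun term => PySem.Str.isIn term tl) then
      ["cloud", "backend"]
    else
      jdStacks.keys
  let base := relevant_stacks.foldl
    (fun acc stack => acc ++ PySem.List.slice (jdStacks.getD stack []) none (some 3)) []
  let required_skills := keywords.foldl
    (fun acc keyword =>
      if (acc.map PySem.Str.lower).contains (PySem.Str.lower keyword) then acc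
      else acc ++ [pyCapitalize keyword]) base
  jdTemplate title
    (PySem.Str.join ", " (PySem.List.slice required_skills none (some 3)))
    (PySem.Str.join ", " (PySem.List.slice required_skills none (some 2)))
    (PySem.Str.join ", " (PySem.List.slice required_skills (some 3) (some 5)))

-- ===== PORT B =====
def generate_job_description_py_alt (title : String) (keywords : List String) : String :=
  let t := PySem.Str.lower title
  let p : String × String × String :=
    if (["frontend", "web", "ui", "ux"] : List String).any (fun w => PySem.Str.isIn w t) then
      ("HTML, CSS, JavaScript", "HTML, CSS", "Node.js, Python")
    else if (["backend", "server"] : List String).any (fun w => PySem.Str.isIn w t) then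
      ("Node.js, Python, Java", "Node.js, Python", "SQL, MongoDB")
    else if (["full stack", "fullstack"] : List String).any (fun w => PySem.Str.isIn w t) then
      ("HTML, CSS, JavaScript", "HTML, CSS", "Node.js, Python")
    else if (["data", "scientist", "analyst"] : List String).any (fun w => PySem.Str.isIn w t) then
      ("Python, R, SQL", "Python, R", "SQL, MongoDB")
    else if (["devops", "cloud", "infrastructure"] : List String).any (fun w => PySem.Str.isIn w t) then
      ("AWS, Azure, Google Cloud", "AWS, Azure", "Node.js, Python")
    else
      ("HTML, CSS, JavaScript", "HTML, CSS", "Node.js, Python")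
  jdTemplate title p.1 p.2.1 p.2.2

-- ===== PRECONDITION & SPEC =====
def Spec_generate_job_description_py (title : String) (keywords : List String) (out : String) : Prop := out = generate_job_description_py_alt title keywords
instance (title : String) (keywords : List String) (out : String) : Decidable (Spec_generate_job_description_py title keywords out) := by unfold Spec_generate_job_description_py; infer_instance

-- ===== CLAIM =====
def Claim_equal_generate_job_description_py : Prop := ∀ (title : String) (keywords : List String), Dom_generate_job_description_py title keywords → Spec_generate_job_description_py title keywords (generate_job_description_py title keywords)

-- ===== LEMMAS AND PROOFS =====

-- The keyword loop only ever appends: its result is the base list followed by some suffix.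
theorem foldl_keyword_extends (ks : List String) (base : List String) :
    ∃ r, ks.foldl (fun acc keyword =>
      if (acc.map PySem.Str.lower).contains (PySem.Str.lower keyword) then acc
      else acc ++ [pyCapitalize keyword]) base = base ++ r := by
  induction ks generalizing base with
  | nil => exact ⟨[], (List.append_nil base).symm⟩
  | cons k rest ih =>
    simp only [List.foldl_cons]
    by_cases h : (base.map PySem.Str.lower).contains (PySem.Str.lower k) = true
    · rw [if_pos h]; exact ih base
    · rw [if_neg h]
      obtain ⟨r, hr⟩ := ih (base ++ [pyCapitalize k])
      exact ⟨pyCapitalize k :: r, by rw [hr, List.append_assoc]; rfl⟩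

-- Only the first five skills reach the template: appending any suffix after them changes nothing.
theorem jdRender_prefix (title a b c d e : String) (rest extra : List String) :
    jdTemplate title
      (PySem.Str.join ", " (PySem.List.slice ((a::b::c::d::e::rest) ++ extra) none (some 3)))
      (PySem.Str.join ", " (PySem.List.slice ((a::b::c::d::e::rest) ++ extra) none (some 2)))
      (PySem.Str.join ", " (PySem.List.slice ((a::b::c::d::e::rest) ++ extra) (some 3) (some 5)))
    = jdTemplate title
      (PySem.Str.join ", " [a, b, c])
      (PySem.Str.join ", " [a, b])
      (PySem.Str.join ", " [d, e]) := by
  rw [show (2:Int) = ((2:Nat):Int) from rfl, show (3:Int) = ((3:Nat):Int) from rfl,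
    show (5:Int) = ((5:Nat):Int) from rfl,
    PySem.List.slice_to_natCast, PySem.List.slice_to_natCast, PySem.List.slice_natCast]
  rfl

-- ===== VERDICT =====
theorem generate_job_description_py_spec : Claim_equal_generate_job_description_py := by
  intro title keywords _
  unfold Spec_generate_job_description_py
  unfold generate_job_description_py generate_job_description_py_alt
  simp only []
  split_ifs <;>
  · first
    | (obtain ⟨r, hr⟩ := foldl_keyword_extends keywords
        ["HTML", "CSS", "JavaScript", "Node.js", "Python", "Java"]
       rw [show ((["frontend", "backend"] : List String).foldl
            (fun acc stack => acc ++ PySem.List.slice (jdStacks.getD stack []) none (some 3)) [])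
          = ["HTML", "CSS", "JavaScript", "Node.js", "Python", "Java"] from rfl, hr,
          jdRender_prefix]
       rfl)
    | (obtain ⟨r, hr⟩ := foldl_keyword_extends keywords
        ["Node.js", "Python", "Java", "SQL", "MongoDB", "PostgreSQL"]
       rw [show ((["backend", "database"] : List String).foldl
            (fun acc stack => acc ++ PySem.List.slice (jdStacks.getD stack []) none (some 3)) [])
          = ["Node.js", "Python", "Java", "SQL", "MongoDB", "PostgreSQL"] from rfl, hr,
          jdRender_prefix]
       rfl)
    | (obtain ⟨r, hr⟩ := foldl_keyword_extends keywords
        ["HTML", "CSS", "JavaScript", "Node.js", "Python", "Java", "SQL", "MongoDB", "PostgreSQL"]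
       rw [show ((["frontend", "backend", "database"] : List String).foldl
            (fun acc stack => acc ++ PySem.List.slice (jdStacks.getD stack []) none (some 3)) [])
          = ["HTML", "CSS", "JavaScript", "Node.js", "Python", "Java", "SQL", "MongoDB", "PostgreSQL"] from rfl, hr,
          jdRender_prefix]
       rfl)
    | (obtain ⟨r, hr⟩ := foldl_keyword_extends keywords
        ["Python", "R", "SQL", "SQL", "MongoDB", "PostgreSQL"]
       rw [show ((["data", "database"] : List String).foldl
            (fun acc stack => acc ++ PySem.List.slice (jdStacks.getD stack []) none (some 3)) [])
          = ["Python", "R", "SQL", "SQL", "MongoDB", "PostgreSQL"] from rfl, hr,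
          jdRender_prefix]
       rfl)
    | (obtain ⟨r, hr⟩ := foldl_keyword_extends keywords
        ["AWS", "Azure", "Google Cloud", "Node.js", "Python", "Java"]
       rw [show ((["cloud", "backend"] : List String).foldl
            (fun acc stack => acc ++ PySem.List.slice (jdStacks.getD stack []) none (some 3)) [])
          = ["AWS", "Azure", "Google Cloud", "Node.js", "Python", "Java"] from rfl, hr,
          jdRender_prefix]
       rfl)
    | (obtain ⟨r, hr⟩ := foldl_keyword_extends keywords
        ["HTML", "CSS", "JavaScript", "Node.js", "Python", "Java", "SQL", "MongoDB", "PostgreSQL", "AWS", "Azure", "Google Cloud", "Python", "R", "SQL"]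
       rw [show ((jdStacks.keys : List String).foldl
            (fun acc stack => acc ++ PySem.List.slice (jdStacks.getD stack []) none (some 3)) [])
          = ["HTML", "CSS", "JavaScript", "Node.js", "Python", "Java", "SQL", "MongoDB", "PostgreSQL", "AWS", "Azure", "Google Cloud", "Python", "R", "SQL"] from rfl, hr,
          jdRender_prefix]
       rfl)
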